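-- pv_equiv track=rewrite | github.com/VIBogdanov/demo-python | src/demo/puzzles.py | get_max_from_min_difference
-- ===== SOURCE A (Python) =====
-- from collections.abc import Generator, Iterable, Iterator
--
-- def get_max_from_min_difference(
--     groups: int, members: int, data: Iterable[int]
-- ) -> int | None:
--     """Найти заданное число групп с минимальными разницами между числами в группах и из них выбрать
--       группу с максимальной разницей. Вернуть значение максимальной разницы найденной группы.
--
--     Details:
--         Формируется список пар (ключ, значение) всех возможных групп. В каждой группе числа отсортированы.
--         Значения - это разница между последним и первым числом в группе. Ключи - индекс группы в исходном
--         предварительно отсортированном массиве данных. Ключи дополнительно играют роль определителей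
--         пересечения диапазонов индексов групп, т.к. одно и то же число может содержаться в нескольких
--         группах. Необходимо будет отбирать группы с непересекающимися диапазонами чисел, для чего понадобятся
--         ключи и шаг непересекающихся диапазонов.
--
--     Examples:
--         Пример 1: groups=3, members=3, data=[1, 1, 1, 2, 2, 2, 2, 10, 10, 11], result=1
--         Пример 2: groups=3, members=3, data=[1, 1, 1, 2, 2, 2, 2, 10, 10], result=8
--         Пример 3: groups=2, members=3, data=[1, 1, 2, 2, 2, 3, 3], result=1
--         Пример 4: groups=2, members=3, data=[170, 205, 225, 190, 260, 130, 225, 160], result=30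
--
--     Args:
--         groups (int): Число групп
--         members (int): Размер группы
--         data (Sequence[int]): Массив чисел
--
--     Returns:
--         int | None: Найденная разница между числами или None, если поиск безуспешен
--     """
--     # Массив исходных данных обязательно должен быть отсортирован, чтобы значения в каждой
--     # группе были по возрастанию
--     _data: list[int] = sorted(data)
--     len_data: int = len(_data)
--     size_groups: int = groups * members
--     # Если сформировать требуемое количество групп невозможно, досрочно выходим
--     if len_data == 0 or size_groups > len_data or size_groups <= 0:
--         return None
--     # Вычисляем смещение, начиная с которого ищем непересекающуюся группу с результирующей разницей
--     # Пример 1: 6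
--     # Пример 2: 6
--     # Пример 3: 3
--     # Пример 4: 3
--     offset: int = members * (groups - 1)
--     # Формируем список всех возможных групп заданного размера (members), одновременно сортируя
--     # ключи по возрастанию величины разницы между числами в группе. В список отбираются только
--     # те ключи, которые позволяют сформировать заданное число групп.
--     # Пример 1: [(0, 0), (1, 1), (7, 1), (6, 8)]
--     # Пример 2: [(0, 0), (6, 8)]
--     # Пример 3: [(0, 1), (1, 1), (3, 1), (4, 1)]
--     # Пример 4: [(4, 20), (1, 30), (2, 35), (3, 35), (5, 35), (0, 40)]
--     diff_groups: list[tuple[int, int]] = sorted(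
--         (
--             (a, _data[b] - _data[a])
--             for a, b in enumerate(range(members - 1, len_data))
--             if a >= offset or a <= (len_data - size_groups)
--         ),
--         key=lambda item: item[1],
--     )
--     # Отсортированный список больше не нужен
--     del _data
--     # Достаточно отобрать только первый ключ, который должен иметь пару с заданным смещением
--     # Пример 1: 0
--     # Пример 2: 0
--     # Пример 3: 0
--     # Пример 4: 4
--     for start_key, _ in diff_groups:
--         # Ищем ближайшую пару для стартового ключа с заданным смещением, которое зависит от
--         # количества и размера групп. Найденная пара является той группой, разница чисел в
--         # которой и есть искомый результат. Если найти группу невозможно, возвращаем None.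
--         # Пример 1: 7
--         # Пример 2: 6
--         # Пример 3: 3
--         # Пример 4: 1
--         return next(
--             (value for key, value in diff_groups if abs(key - start_key) >= offset),
--             None,
--         )
-- ===== SOURCE B (Python) =====
-- def get_max_from_min_difference(groups, members, data):
--     # Two accumulator scans over index ranges; no candidate list, no pair sort (alternative strategy).
--     if groups < 1 or members < 1:
--         return None
--     d = sorted(data)
--     n = len(d)
--     if groups * members > n:
--         return None
--     offset = members * (groups - 1)
--     lo_end = n - groups * members      # a <= lo_end or a >= offset are the admissible starts
--     last = n - members                 # last possible group start
--     # pass 1: first start index with minimal in-group difference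
--     best_key = best_diff = None
--     a = 0
--     while a <= last:
--         if a > lo_end and a < offset:  # skip the inadmissible middle band in one jump
--             a = offset
--             continue
--         diff = d[a + members - 1] - d[a]
--         if best_diff is None or diff < best_diff:
--             best_key, best_diff = a, diff
--         a += 1
--     if best_key is None:
--         return None
--     # pass 2: minimal difference among starts offset-compatible with best_key
--     ans = None
--     a = 0
--     while a <= last:
--         if a > lo_end and a < offset:
--             a = offset
--             continue
--         if abs(a - best_key) >= offset:
--             diff = d[a + members - 1] - d[a]
--             if ans is None or diff < ans:
--                 ans = diff
--         a += 1
--     return ans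
-- ===== Notes on version B (the rewrite author's own statement) =====
-- stated objective: alternative
-- what changed: B drops A's materialised candidate pair list, its stable sort by difference and the scan of the sorted list: after sorting the data once, B makes two while-loop accumulator scans over the start-index range (jumping the inadmissible middle band), keeping only a running minimum; measured run time is about the same.
import Mathlib
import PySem

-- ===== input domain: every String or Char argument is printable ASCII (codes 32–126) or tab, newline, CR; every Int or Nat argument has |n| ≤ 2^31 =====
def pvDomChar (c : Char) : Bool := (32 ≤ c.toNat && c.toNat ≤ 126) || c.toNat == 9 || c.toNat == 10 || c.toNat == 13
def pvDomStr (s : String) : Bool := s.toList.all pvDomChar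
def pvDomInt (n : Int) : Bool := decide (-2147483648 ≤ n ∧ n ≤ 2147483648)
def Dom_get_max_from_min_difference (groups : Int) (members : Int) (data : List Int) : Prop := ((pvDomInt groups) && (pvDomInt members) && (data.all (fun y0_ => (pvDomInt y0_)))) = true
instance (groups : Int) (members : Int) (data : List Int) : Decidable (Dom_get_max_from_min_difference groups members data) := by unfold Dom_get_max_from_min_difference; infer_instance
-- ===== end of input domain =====

-- B replaces A's materialised candidate list, its stable sort by difference and the scan of the
-- sorted list by two recursive accumulator scans over the index range that jump over the
-- inadmissible middle band (objective: alternative; no pair list, no pair sort).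

-- ===== PORT A =====
def get_max_from_min_difference (groups : Int) (members : Int) (data : List Int) : Option Int :=
  let _data := PySem.List.sorted data (fun x => x) false
  let len_data : Int := _data.length
  let size_groups : Int := groups * members
  if len_data = 0 ∨ size_groups > len_data ∨ size_groups ≤ 0 then none
  else
    let offset : Int := members * (groups - 1)
    let diff_groups :=
      PySem.List.sorted
        (((PySem.List.enumerate (PySem.List.pyRange (members - 1) len_data) 0).filter
            (fun ab => decide (ab.1 ≥ offset) || decide (ab.1 ≤ len_data - size_groups))).map
          (fun ab => (ab.1, PySem.List.pyGetD _data ab.2 0 - PySem.List.pyGetD _data ab.1 0)))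
        (fun item => item.2) false
    match diff_groups with
    | [] => none
    | (start_key, _) :: _ =>
        (diff_groups.find? (fun kv => decide (|kv.1 - start_key| ≥ offset))).map (fun kv => kv.2)

-- ===== PORT B =====
-- pass 1 of Source B: while a ≤ last, jumping the inadmissible band, keep the first start index with
-- the minimal in-group difference in the accumulator (key, diff)
def pvScan1 (d : List Int) (members offset loEnd last : Int) :
    Nat → Int → Option (Int × Int) → Option (Int × Int)
  | 0, _, acc => acc
  | fuel + 1, a, acc =>
    if a > last then acc
    else if a > loEnd ∧ a < offset then
      pvScan1 d members offset loEnd last fuel offset acc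
    else
      let diff := PySem.List.pyGetD d (a + members - 1) 0 - PySem.List.pyGetD d a 0
      pvScan1 d members offset loEnd last fuel (a + 1)
        (match acc with
         | none => some (a, diff)
         | some b => if diff < b.2 then some (a, diff) else some b)

-- pass 2 of Source B: same walk, keep the minimal difference among starts offset-compatible with bk
def pvScan2 (d : List Int) (members offset loEnd last bk : Int) :
    Nat → Int → Option Int → Option Int
  | 0, _, acc => acc
  | fuel + 1, a, acc =>
    if a > last then acc
    else if a > loEnd ∧ a < offset then
      pvScan2 d members offset loEnd last bk fuel offset acc
    else
      pvScan2 d members offset loEnd last bk fuel (a + 1)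
        (if |a - bk| ≥ offset then
           let diff := PySem.List.pyGetD d (a + members - 1) 0 - PySem.List.pyGetD d a 0
           match acc with
           | none => some diff
           | some v => if diff < v then some diff else some v
         else acc)

def get_max_from_min_difference_alt (groups : Int) (members : Int) (data : List Int) : Option Int :=
  if groups < 1 ∨ members < 1 then none
  else
    let d := PySem.List.sorted data (fun x => x) false
    let n : Int := d.length
    if groups * members > n then none
    else
      let offset : Int := members * (groups - 1)
      let loEnd : Int := n - groups * members
      let last : Int := n - members
      match pvScan1 d members offset loEnd last (last + 1).toNat 0 none with
      | none => none
      | some bd => pvScan2 d members offset loEnd last bd.1 (last + 1).toNat 0 none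

-- ===== PRECONDITION & SPEC =====
-- Pre_ excludes exactly the inputs with members < 0 and groups < 0 whose positive product still
-- fits the data length: there A always raises IndexError (its enumerate index runs past the list).
def Pre_get_max_from_min_difference (groups : Int) (members : Int) (data : List Int) : Prop :=
  ¬ (members < 0 ∧ groups < 0 ∧ 0 < groups * members ∧ groups * members ≤ (data.length : Int))
instance (groups : Int) (members : Int) (data : List Int) : Decidable (Pre_get_max_from_min_difference groups members data) := by unfold Pre_get_max_from_min_difference; infer_instance

def pvWitness_get_max_from_min_difference : Int × Int × List Int := (3, 3, [1, 1, 1, 2, 2, 2, 2, 10, 10, 11])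

def Spec_get_max_from_min_difference (groups : Int) (members : Int) (data : List Int) (out : Option Int) : Prop := out = get_max_from_min_difference_alt groups members data
instance (groups : Int) (members : Int) (data : List Int) (out : Option Int) : Decidable (Spec_get_max_from_min_difference groups members data out) := by unfold Spec_get_max_from_min_difference; infer_instance

-- ===== CLAIM (what is proved, stated in full; the proofs are below) =====
def Claim_equal_get_max_from_min_difference : Prop := ∀ (groups : Int) (members : Int) (data : List Int), Dom_get_max_from_min_difference groups members data → Pre_get_max_from_min_difference groups members data → Spec_get_max_from_min_difference groups members data (get_max_from_min_difference groups members data)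

-- ===== LEMMAS AND PROOFS =====

-- enumerate over a step-1 range is a reindexed step-1 range
theorem pv_enum_pyRange (k : Nat) : ∀ (s t c : Int), t - s = (k : Int) →
    PySem.List.enumerate (PySem.List.pyRange s t) c
      = (PySem.List.pyRange c (c + (k : Int))).map (fun a => (a, a + (s - c))) := by
  induction k with
  | zero =>
    intro s t c h
    have hts : t ≤ s := by omega
    have h1 : PySem.List.pyRange s t = [] := by
      refine List.eq_nil_iff_forall_not_mem.2 ?_
      intro x hx
      rw [PySem.List.mem_pyRange_one] at hx
      omega
    have h2 : PySem.List.pyRange c (c + ((0 : Nat) : Int)) = [] := by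
      refine List.eq_nil_iff_forall_not_mem.2 ?_
      intro x hx
      rw [PySem.List.mem_pyRange_one] at hx
      omega
    rw [h1, h2]
    rfl
  | succ k ih =>
    intro s t c h
    have hst : s < t := by omega
    have hck : c < c + ((k + 1 : Nat) : Int) := by push_cast; omega
    rw [PySem.List.pyRange_one_cons hst, PySem.List.enumerate_cons,
        PySem.List.pyRange_one_cons hck, List.map_cons]
    have htail : t - (s + 1) = (k : Int) := by omega
    rw [ih (s + 1) t (c + 1) htail]
    have hb : c + 1 + (k : Int) = c + ((k + 1 : Nat) : Int) := by push_cast; ring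
    have hf : s + 1 - (c + 1) = s - c := by ring
    rw [hb, hf]
    have hh : c + (s - c) = s := by ring
    rw [hh]

-- head of insertBy is the strict-min step
theorem pv_head_insertBy {α κ : Type} [LT κ] [DecidableLT κ] (key : α → κ) (x : α) (s : List α) :
    (PySem.List.insertBy (fun a b => decide (key a < key b)) x s).head?
      = (match s.head? with
         | none => some x
         | some m => if key x < key m then some x else some m) := by
  cases s with
  | nil => simp [PySem.List.insertBy]
  | cons y ys =>
    by_cases h : key x < key y
    · simp [PySem.List.insertBy, h]
    · simp [PySem.List.insertBy, h]

theorem pv_head_foldl_insertBy {α κ : Type} [LT κ] [DecidableLT κ] (key : α → κ) :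
    ∀ (l : List α) (acc : List α),
    (List.foldl (fun acc x => PySem.List.insertBy (fun a b => decide (key a < key b)) x acc) acc l).head?
      = List.foldl
          (fun o x =>
            match o with
            | none => some x
            | some m => if key x < key m then some x else some m)
          acc.head? l := by
  intro l
  induction l with
  | nil => intro acc; rfl
  | cons x xs ih =>
    intro acc
    simp only [List.foldl_cons]
    rw [ih, pv_head_insertBy]

-- Python's min on ties is the head of the stable sort
theorem pv_min?_eq_head_sorted {α κ : Type} [LT κ] [DecidableLT κ] (xs : List α) (key : α → κ) :
    PySem.List.min? xs key = (PySem.List.sorted xs key).head? := by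
  rw [PySem.List.sorted_eq_foldl_insertBy, pv_head_foldl_insertBy]
  rfl

-- Python's min as the running-minimum fold
theorem pv_min?_eq_foldl {α κ : Type} [LT κ] [DecidableLT κ] (xs : List α) (key : α → κ) :
    PySem.List.min? xs key
      = xs.foldl
          (fun o x =>
            match o with
            | none => some x
            | some m => if key x < key m then some x else some m)
          none := by
  rw [pv_min?_eq_head_sorted, PySem.List.sorted_eq_foldl_insertBy, pv_head_foldl_insertBy]
  rfl

-- the conditional running minimum is the running minimum of the filtered list
theorem pv_fold2 (d : List Int) (members bk offset : Int) :
    ∀ (V : List Int) (acc : Option Int),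
    V.foldl
        (fun o x =>
          if |x - bk| ≥ offset then
            let diff := PySem.List.pyGetD d (x + members - 1) 0 - PySem.List.pyGetD d x 0
            match o with
            | none => some diff
            | some v => if diff < v then some diff else some v
          else o)
        acc
      = (V.filter (fun a => decide (|a - bk| ≥ offset))).foldl
          (fun o x =>
            let diff := PySem.List.pyGetD d (x + members - 1) 0 - PySem.List.pyGetD d x 0
            match o with
            | none => some diff
            | some v => if diff < v then some diff else some v)
          acc := by
  intro V
  induction V with
  | nil => intro acc; rfl
  | cons a V ih =>
    intro acc
    by_cases h : |a - bk| ≥ offset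
    · have hd : decide (|a - bk| ≥ offset) = true := by simpa using h
      simp only [List.foldl_cons, if_pos h, List.filter_cons, hd, if_true]
      exact ih _
    · have hd : decide (|a - bk| ≥ offset) = false := by simpa using h
      simp only [List.foldl_cons, if_neg h, List.filter_cons, hd, Bool.false_eq_true, if_false]
      exact ih acc

-- the first match in a key-sorted list has minimal key among all matches
theorem pv_find?_min {α : Type} (key : α → Int) (q : α → Bool) :
    ∀ (S : List α), S.Pairwise (fun a b => key a ≤ key b) → ∀ {x : α}, S.find? q = some x →
      ∀ y ∈ S, q y = true → key x ≤ key y := by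
  intro S
  induction S with
  | nil => intro _ x hx; simp at hx
  | cons a S' ih =>
    intro hp x hx y hy hqy
    rcases List.pairwise_cons.1 hp with ⟨ha, hp'⟩
    by_cases hqa : q a = true
    · rw [List.find?_cons_of_pos hqa] at hx
      cases hx
      rcases List.mem_cons.1 hy with rfl | hy'
      · exact le_refl _
      · exact ha y hy'
    · rw [List.find?_cons_of_neg (by simp [hqa])] at hx
      rcases List.mem_cons.1 hy with rfl | hy'
      · exact absurd hqy hqa
      · exact ih hp' hx y hy' hqy

-- first match in the value-sorted pair list = min of the values of all matches
theorem pv_find?_sorted_eq_min? (L : List (Int × Int)) (q : Int × Int → Bool) :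
    ((PySem.List.sorted L (fun p => p.2)).find? q).map (fun kv => kv.2)
      = PySem.List.min? ((L.filter q).map (fun kv => kv.2)) (fun v => v) := by
  cases hf : (PySem.List.sorted L (fun p => p.2)).find? q with
  | none =>
    have : L.filter q = [] := by
      refine List.eq_nil_iff_forall_not_mem.2 ?_
      intro z hz
      rcases List.mem_filter.1 hz with ⟨hz1, hz2⟩
      exact List.find?_eq_none.1 hf z ((PySem.List.mem_sorted L (fun p => p.2) false z).2 hz1) hz2
    simp [this, PySem.List.min?]
  | some x =>
    have hqx : q x = true := List.find?_some hf
    have hxS : x ∈ PySem.List.sorted L (fun p => p.2) := List.mem_of_find?_eq_some hf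
    have hxL : x ∈ L := (PySem.List.mem_sorted L (fun p => p.2) false x).1 hxS
    have hxm : x.2 ∈ (L.filter q).map (fun kv => kv.2) :=
      List.mem_map.2 ⟨x, List.mem_filter.2 ⟨hxL, hqx⟩, rfl⟩
    cases hm : PySem.List.min? ((L.filter q).map (fun kv => kv.2)) (fun v => v) with
    | none =>
      rw [PySem.List.min?_eq_none_iff] at hm
      rw [hm] at hxm
      exact absurd hxm (by simp)
    | some v =>
      have hvm : v ∈ (L.filter q).map (fun kv => kv.2) := PySem.List.min?_mem hm
      rcases List.mem_map.1 hvm with ⟨y, hyf, rfl⟩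
      rcases List.mem_filter.1 hyf with ⟨hyL, hqy⟩
      have h1 : y.2 ≤ x.2 := PySem.List.min?_isMin hm x.2 hxm
      have h2 : x.2 ≤ y.2 :=
        pv_find?_min (fun p : Int × Int => p.2) q _
          (PySem.List.sorted_pairwise L (fun p => p.2)) hf y
          ((PySem.List.mem_sorted L (fun p => p.2) false y).2 hyL) hqy
      simp [le_antisymm h1 h2]

-- the jump skips only inadmissible indices
theorem pv_filter_jump (offset loEnd last a : Int) (hlo : loEnd < a) (hoff : a ≤ offset) :
    (PySem.List.pyRange a (last + 1)).filter
        (fun x => decide (x ≥ offset) || decide (x ≤ loEnd))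
      = (PySem.List.pyRange offset (last + 1)).filter
          (fun x => decide (x ≥ offset) || decide (x ≤ loEnd)) := by
  by_cases hc : offset ≤ last + 1
  · rw [PySem.List.pyRange_one_append a offset (last + 1) hoff hc, List.filter_append]
    have h0 : (PySem.List.pyRange a offset).filter
        (fun x => decide (x ≥ offset) || decide (x ≤ loEnd)) = [] := by
      refine List.filter_eq_nil_iff.2 ?_
      intro x hx
      rw [PySem.List.mem_pyRange_one] at hx
      simp only [Bool.or_eq_true, decide_eq_true_eq, not_or]
      omega
    rw [h0, List.nil_append]
  · have h1 : PySem.List.pyRange a (last + 1) =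
        (PySem.List.pyRange a (last + 1)) := rfl
    have hL : (PySem.List.pyRange a (last + 1)).filter
        (fun x => decide (x ≥ offset) || decide (x ≤ loEnd)) = [] := by
      refine List.filter_eq_nil_iff.2 ?_
      intro x hx
      rw [PySem.List.mem_pyRange_one] at hx
      simp only [Bool.or_eq_true, decide_eq_true_eq, not_or]
      omega
    have hR : PySem.List.pyRange offset (last + 1) = [] := by
      refine List.eq_nil_iff_forall_not_mem.2 ?_
      intro x hx
      rw [PySem.List.mem_pyRange_one] at hx
      omega
    rw [hL, hR]
    rfl

-- pass 1 is the option-min fold over the admissible index range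
theorem pv_scan1_eq (d : List Int) (members offset loEnd last : Int) :
    ∀ (k : Nat) (a : Int) (acc : Option (Int × Int)), (last + 1 - a).toNat ≤ k →
    pvScan1 d members offset loEnd last k a acc
      = ((PySem.List.pyRange a (last + 1)).filter
            (fun x => decide (x ≥ offset) || decide (x ≤ loEnd))).foldl
          (fun o x =>
            let diff := PySem.List.pyGetD d (x + members - 1) 0 - PySem.List.pyGetD d x 0
            match o with
            | none => some (x, diff)
            | some b => if diff < b.2 then some (x, diff) else some b)
          acc := by
  intro k
  induction k with
  | zero =>
    intro a acc hk
    have h1 : PySem.List.pyRange a (last + 1) = [] := by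
      refine List.eq_nil_iff_forall_not_mem.2 ?_
      intro x hx
      rw [PySem.List.mem_pyRange_one] at hx
      omega
    rw [h1]
    rfl
  | succ k ih =>
    intro a acc hk
    by_cases ha : a > last
    · have h1 : PySem.List.pyRange a (last + 1) = [] := by
        refine List.eq_nil_iff_forall_not_mem.2 ?_
        intro x hx
        rw [PySem.List.mem_pyRange_one] at hx
        omega
      rw [pvScan1, if_pos ha, h1]
      rfl
    · by_cases hj : a > loEnd ∧ a < offset
      · rw [pvScan1, if_neg ha, if_pos hj,
            pv_filter_jump offset loEnd last a hj.1 (le_of_lt hj.2)]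
        exact ih offset acc (by omega)
      · have hcons : PySem.List.pyRange a (last + 1)
            = a :: PySem.List.pyRange (a + 1) (last + 1) :=
          PySem.List.pyRange_one_cons (by omega)
        have hva : (decide (a ≥ offset) || decide (a ≤ loEnd)) = true := by
          simp only [Bool.or_eq_true, decide_eq_true_eq]
          omega
        rw [pvScan1, if_neg ha, if_neg hj, hcons]
        simp only [List.filter_cons, hva, if_true, List.foldl_cons]
        exact ih (a + 1) _ (by omega)

-- pass 2 is the conditional option-min fold over the admissible index range
theorem pv_scan2_eq (d : List Int) (members offset loEnd last bk : Int) :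
    ∀ (k : Nat) (a : Int) (acc : Option Int), (last + 1 - a).toNat ≤ k →
    pvScan2 d members offset loEnd last bk k a acc
      = ((PySem.List.pyRange a (last + 1)).filter
            (fun x => decide (x ≥ offset) || decide (x ≤ loEnd))).foldl
          (fun o x =>
            if |x - bk| ≥ offset then
              let diff := PySem.List.pyGetD d (x + members - 1) 0 - PySem.List.pyGetD d x 0
              match o with
              | none => some diff
              | some v => if diff < v then some diff else some v
            else o)
          acc := by
  intro k
  induction k with
  | zero =>
    intro a acc hk
    have h1 : PySem.List.pyRange a (last + 1) = [] := by
      refine List.eq_nil_iff_forall_not_mem.2 ?_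
      intro x hx
      rw [PySem.List.mem_pyRange_one] at hx
      omega
    rw [h1]
    rfl
  | succ k ih =>
    intro a acc hk
    by_cases ha : a > last
    · have h1 : PySem.List.pyRange a (last + 1) = [] := by
        refine List.eq_nil_iff_forall_not_mem.2 ?_
        intro x hx
        rw [PySem.List.mem_pyRange_one] at hx
        omega
      rw [pvScan2, if_pos ha, h1]
      rfl
    · by_cases hj : a > loEnd ∧ a < offset
      · rw [pvScan2, if_neg ha, if_pos hj,
            pv_filter_jump offset loEnd last a hj.1 (le_of_lt hj.2)]
        exact ih offset acc (by omega)
      · have hcons : PySem.List.pyRange a (last + 1)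
            = a :: PySem.List.pyRange (a + 1) (last + 1) :=
          PySem.List.pyRange_one_cons (by omega)
        have hva : (decide (a ≥ offset) || decide (a ≤ loEnd)) = true := by
          simp only [Bool.or_eq_true, decide_eq_true_eq]
          omega
        rw [pvScan2, if_neg ha, if_neg hj, hcons]
        simp only [List.filter_cons, hva, if_true, List.foldl_cons]
        exact ih (a + 1) _ (by omega)

theorem pv_main (groups members : Int) (data : List Int)
    (hpre : Pre_get_max_from_min_difference groups members data) :
    get_max_from_min_difference groups members data
      = get_max_from_min_difference_alt groups members data := by
  unfold Pre_get_max_from_min_difference at hpre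
  simp only [get_max_from_min_difference, get_max_from_min_difference_alt]
  by_cases hg : groups < 1 ∨ members < 1
  · have hAcond : ((PySem.List.sorted data (fun x => x) false).length : Int) = 0 ∨
        groups * members > ((PySem.List.sorted data (fun x => x) false).length : Int) ∨
        groups * members ≤ 0 := by
      rw [PySem.List.length_sorted]
      by_cases hp : 0 < groups * members
      · rcases mul_pos_iff.1 hp with ⟨hg1, hm1⟩ | ⟨hg1, hm1⟩
        · exact absurd hg (by omega)
        · right; left
          by_contra hcon
          exact hpre ⟨hm1, hg1, hp, by omega⟩
      · right; right; omega
    rw [if_pos hg, if_pos hAcond]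
  · have hg1 : 1 ≤ groups := by omega
    have hm1 : 1 ≤ members := by omega
    rw [if_neg hg]
    by_cases hsz : groups * members > ((PySem.List.sorted data (fun x => x) false).length : Int)
    · rw [if_pos hsz, if_pos (Or.inr (Or.inl hsz))]
    · have hspos : 0 < groups * members :=
        mul_pos (show (0 : Int) < groups by omega) (show (0 : Int) < members by omega)
      rw [if_neg hsz,
        if_neg (show ¬(((PySem.List.sorted data (fun x => x) false).length : Int) = 0 ∨
          groups * members > ((PySem.List.sorted data (fun x => x) false).length : Int) ∨
          groups * members ≤ 0) by omega)]
      set d := PySem.List.sorted data (fun x => x) false with hd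
      have hms : members ≤ groups * members := le_mul_of_one_le_left (by omega) (by omega)
      have hszn : groups * members ≤ ((d.length : Int)) := by omega
      -- A's candidate list, reindexed to plain start indices
      have hLA :
          ((PySem.List.enumerate (PySem.List.pyRange (members - 1) (d.length : Int))).filter
              (fun ab => decide (ab.1 ≥ members * (groups - 1)) ||
                decide (ab.1 ≤ (d.length : Int) - groups * members))).map
            (fun ab => (ab.1, PySem.List.pyGetD d ab.2 0 - PySem.List.pyGetD d ab.1 0))
          = ((PySem.List.pyRange 0 ((d.length : Int) - members + 1)).filter
                (fun a => decide (a ≥ members * (groups - 1)) ||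
                  decide (a ≤ (d.length : Int) - groups * members))).map
              (fun a => (a, PySem.List.pyGetD d (a + members - 1) 0 - PySem.List.pyGetD d a 0)) := by
        rw [pv_enum_pyRange ((d.length : Int) - members + 1).toNat (members - 1) (d.length : Int) 0
          (by omega)]
        rw [show (0 : Int) + ((((d.length : Int) - members + 1).toNat : Int))
              = (d.length : Int) - members + 1 from by omega]
        rw [List.filter_map, List.map_map]
        refine congrArg₂ _ ?_ rfl
        funext a
        show (a, PySem.List.pyGetD d (a + (members - 1 - 0)) 0 - PySem.List.pyGetD d a 0)
            = (a, PySem.List.pyGetD d (a + members - 1) 0 - PySem.List.pyGetD d a 0)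
        rw [show a + (members - 1 - 0) = a + members - 1 from by ring]
      rw [hLA]
      set offset := members * (groups - 1) with hoff
      set loEnd := (d.length : Int) - groups * members with hlo
      set last := (d.length : Int) - members with hlast
      set validIdx := (PySem.List.pyRange 0 (last + 1)).filter
          (fun a => decide (a ≥ offset) || decide (a ≤ loEnd)) with hvi
      set cands := validIdx.map
          (fun a => (a, PySem.List.pyGetD d (a + members - 1) 0 - PySem.List.pyGetD d a 0))
        with hcands
      -- pass 1 = min? cands = head of the sorted list
      have hs1 : pvScan1 d members offset loEnd last (last + 1).toNat 0 none
          = PySem.List.min? cands (fun p => p.2) := by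
        rw [pv_scan1_eq d members offset loEnd last (last + 1).toNat 0 none (by omega), ← hvi,
            pv_min?_eq_foldl, hcands, List.foldl_map]
        refine congrArg (fun f => List.foldl f none validIdx) ?_
        funext o x
        cases o <;> rfl
      -- cands is nonempty: the start index 0 always qualifies
      have hmem : (0, PySem.List.pyGetD d (0 + members - 1) 0 - PySem.List.pyGetD d 0 0) ∈ cands := by
        rw [hcands]
        refine List.mem_map.2 ⟨0, List.mem_filter.2 ⟨?_, ?_⟩, rfl⟩
        · rw [PySem.List.mem_pyRange_one]
          omega
        · simp only [Bool.or_eq_true, decide_eq_true_eq]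
          right; omega
      have hsne : PySem.List.sorted cands (fun item => item.2) ≠ [] := by
        rw [Ne, PySem.List.sorted_eq_nil_iff]
        exact List.ne_nil_of_mem hmem
      cases hS : PySem.List.sorted cands (fun item => item.2) with
      | nil => exact absurd hS hsne
      | cons st t =>
        obtain ⟨sk, sv⟩ := st
        have hmin : PySem.List.min? cands (fun p => p.2) = some (sk, sv) := by
          rw [pv_min?_eq_head_sorted, hS]
          rfl
        rw [hs1, hmin]
        -- pass 2 = min of the values of the offset-compatible candidates = A's first match
        have hs2 : pvScan2 d members offset loEnd last sk (last + 1).toNat 0 none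
            = PySem.List.min?
                ((cands.filter (fun kv => decide (|kv.1 - sk| ≥ offset))).map (fun kv => kv.2))
                (fun v => v) := by
          rw [pv_scan2_eq d members offset loEnd last sk (last + 1).toNat 0 none (by omega),
              ← hvi, pv_fold2, pv_min?_eq_foldl, hcands, List.filter_map, List.map_map,
              List.foldl_map]
          simp only [Function.comp_def]
          refine congrArg₂ (fun f l => List.foldl f none l) ?_ rfl
          funext o x
          cases o <;> rfl
        have hkey := pv_find?_sorted_eq_min? cands
          (fun kv => decide (|kv.1 - sk| ≥ offset))
        rw [hS] at hkey
        show ((((sk, sv) :: t).find? (fun kv => decide (|kv.1 - sk| ≥ offset))).map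
              (fun kv => kv.2))
            = pvScan2 d members offset loEnd last sk (last + 1).toNat 0 none
        rw [hkey, hs2]

-- ===== VERDICT (by name: the statement is the Claim_ definition above) =====
theorem get_max_from_min_difference_spec : Claim_equal_get_max_from_min_difference := by
  intro groups members data _ hpre
  unfold Spec_get_max_from_min_difference
  exact pv_main groups members data hpre
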